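-- pv_equiv track=rewrite | github.com/edy-101/30-day-unstop | 22-2-26.py | maximum_weight_paths
-- ===== SOURCE A (Python) =====
-- def maximum_weight_paths(n, edges, q, queries):
--     edges.sort(key=lambda x: x[2])
--     indexed_queries = sorted(enumerate(queries), key=lambda x: x[1])
--
--     parent = list(range(n + 1))
--     size = [1] * (n + 1)
--
--     def find(x):
--         while parent[x] != x:
--             parent[x] = parent[parent[x]]
--             x = parent[x]
--         return x
--
--     def union(x, y):
--         rx = find(x)
--         ry = find(y)
--         if rx == ry:
--             return 0
--         if size[rx] < size[ry]:
--             rx, ry = ry, rx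
--         parent[ry] = rx
--         paths = size[rx] * size[ry]
--         size[rx] += size[ry]
--         return paths
--
--     res = [0] * q
--     total = 0
--     i = 0
--
--     for idx, val in indexed_queries:
--         while i < len(edges) and edges[i][2] <= val:
--             u, v, _ = edges[i]
--             total += union(u, v)
--             i += 1
--         res[idx] = total
--
--     return res
-- ===== SOURCE B (Python) =====
-- def maximum_weight_paths(n, edges, q, queries):
--     # Side effect kept from A: edges is sorted in place by weight.
--     edges.sort(key=lambda x: x[2])
--
--     def count_pairs(val):
--         # fresh DSU for this query only
--         parent = list(range(n + 1))
--         size = [1] * (n + 1)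
--
--         def find(x):
--             while parent[x] != x:
--                 parent[x] = parent[parent[x]]
--                 x = parent[x]
--             return x
--
--         def union(x, y):
--             rx = find(x)
--             ry = find(y)
--             if rx == ry:
--                 return 0
--             if size[rx] < size[ry]:
--                 rx, ry = ry, rx
--             parent[ry] = rx
--             paths = size[rx] * size[ry]
--             size[rx] += size[ry]
--             return paths
--
--         total = 0
--         for e in edges:
--             if e[2] <= val:
--                 total += union(e[0], e[1])
--         return total
--
--     res = [0] * q
--     for j, val in enumerate(queries):
--         res[j] = count_pairs(val)
--     return res
-- ===== Notes on version B (the rewrite author's own statement) =====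
-- stated objective: alternative
-- what changed: Instead of sorting the queries and sharing one incrementally-extended DSU with an edge pointer across them, B answers each query independently and in original order by rebuilding a fresh DSU over exactly the edges whose weight is at most that query's threshold.
import Mathlib
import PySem

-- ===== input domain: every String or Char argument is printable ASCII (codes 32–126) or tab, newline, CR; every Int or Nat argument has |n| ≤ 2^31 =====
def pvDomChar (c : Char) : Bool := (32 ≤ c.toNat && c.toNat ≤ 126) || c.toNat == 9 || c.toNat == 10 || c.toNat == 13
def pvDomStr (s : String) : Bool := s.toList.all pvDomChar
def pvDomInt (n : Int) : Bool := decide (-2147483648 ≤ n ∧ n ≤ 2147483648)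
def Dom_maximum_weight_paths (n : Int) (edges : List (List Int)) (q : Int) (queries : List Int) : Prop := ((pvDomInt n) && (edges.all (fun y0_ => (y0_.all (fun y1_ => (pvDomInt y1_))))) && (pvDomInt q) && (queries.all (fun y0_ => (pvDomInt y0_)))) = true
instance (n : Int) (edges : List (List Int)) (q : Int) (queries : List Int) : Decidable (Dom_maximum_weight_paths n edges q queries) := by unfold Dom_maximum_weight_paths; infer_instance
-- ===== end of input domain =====

-- B answers each query independently (original order) with a fresh DSU over the edges whose
-- weight ≤ the threshold, instead of A's sorted-queries sweep sharing one incremental DSU.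
-- Both Pythons sort `edges` in place (same observable mutation); the theorems are about the return value.

-- ===== PORT A =====
-- shared DSU helpers: the `find` / `union` closures appear verbatim in both Source A and Source B.
-- `find`'s Python while-loop is ported with fuel = len(parent); under the union-find forest
-- invariant the loop performs at most len(parent) iterations, so the fuel is never exhausted
-- on states either program reaches.
def pvFind (parent : List Int) (x : Int) : Nat → List Int × Int
  | 0 => (parent, x)
  | fuel+1 =>
    let px := PySem.List.pyGetD parent x 0
    if px ≠ x then
      let pp := PySem.List.pyGetD parent px 0
      pvFind (PySem.List.pySetD parent x pp) pp fuel
    else (parent, x)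

def pvUnion (parent size : List Int) (x y : Int) : List Int × List Int × Int :=
  let fx := pvFind parent x parent.length
  let fy := pvFind fx.1 y fx.1.length
  let rx := fx.2
  let ry := fy.2
  if rx = ry then (fy.1, size, 0)
  else
    let rp := if PySem.List.pyGetD size rx 0 < PySem.List.pyGetD size ry 0 then (ry, rx) else (rx, ry)
    let paths := PySem.List.pyGetD size rp.1 0 * PySem.List.pyGetD size rp.2 0
    (PySem.List.pySetD fy.1 rp.2 rp.1,
     PySem.List.pySetD size rp.1 (PySem.List.pyGetD size rp.1 0 + PySem.List.pyGetD size rp.2 0),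
     paths)

-- one edge processed: 'total += union(u, v)' on the state (parent, size, total)
def pvStep (st : List Int × List Int × Int) (e : List Int) : List Int × List Int × Int :=
  let r := pvUnion st.1 st.2.1 (PySem.List.pyGetD e 0 0) (PySem.List.pyGetD e 1 0)
  (r.1, r.2.1, st.2.2 + r.2.2)

-- parent = list(range(n+1)); size = [1]*(n+1); total = 0  (built identically in both Pythons)
def pvInit (n : Int) : List Int × List Int × Int :=
  (PySem.List.pyRange 0 (n + 1) 1, PySem.List.pyRepeat [1] (n + 1), 0)

-- A's inner 'while i < len(edges) and edges[i][2] <= val'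
def pvAdvance (es : List (List Int)) (val : Int) (st : List Int × List Int × Int) (i : Nat) :
    (List Int × List Int × Int) × Nat :=
  if h : i < es.length ∧ PySem.List.pyGetD (PySem.List.pyGetD es (i : Int) []) 2 0 ≤ val then
    pvAdvance es val (pvStep st (PySem.List.pyGetD es (i : Int) [])) (i + 1)
  else (st, i)
termination_by es.length - i
decreasing_by omega

-- body of A's 'for idx, val in indexed_queries' loop
def pvBodyA (es : List (List Int)) (acc : (List Int × List Int × Int) × Nat × List Int)
    (iv : Int × Int) : (List Int × List Int × Int) × Nat × List Int :=
  let r := pvAdvance es iv.2 acc.1 acc.2.1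
  (r.1, r.2, PySem.List.pySetD acc.2.2 iv.1 r.1.2.2)

def maximum_weight_paths (n : Int) (edges : List (List Int)) (q : Int) (queries : List Int) : List Int :=
  let es := PySem.List.sorted edges (fun x => PySem.List.pyGetD x 2 0)
  let iq := PySem.List.sorted (PySem.List.enumerate queries) (fun x => x.2)
  (iq.foldl (pvBodyA es) (pvInit n, 0, PySem.List.pyRepeat [0] q)).2.2

-- ===== PORT B =====
-- count_pairs(val): fresh DSU, 'for e in edges: if e[2] <= val: total += union(e[0], e[1])'
def pvCount (n : Int) (es : List (List Int)) (val : Int) : Int :=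
  (es.foldl (fun st e => if PySem.List.pyGetD e 2 0 ≤ val then pvStep st e else st) (pvInit n)).2.2

-- body of B's 'for j, val in enumerate(queries)' loop: res[j] = count_pairs(val)
def pvBodyB (n : Int) (es : List (List Int)) (res : List Int) (jv : Int × Int) : List Int :=
  PySem.List.pySetD res jv.1 (pvCount n es jv.2)

def maximum_weight_paths_alt (n : Int) (edges : List (List Int)) (q : Int) (queries : List Int) : List Int :=
  let es := PySem.List.sorted edges (fun x => PySem.List.pyGetD x 2 0)
  (PySem.List.enumerate queries).foldl (pvBodyB n es) (PySem.List.pyRepeat [0] q)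

-- ===== PRECONDITION & SPEC =====
-- Exactly where the Python A returns: q ≥ len(queries) unless queries is empty (else res[idx]
-- raises IndexError); every edge has ≥ 3 entries (the sort key needs e[2]); and every edge some
-- query's threshold reaches (only those are ever unpacked/unioned) is an exact triple whose
-- endpoints are valid Python indices into parent/size (negative = Python wraparound, kept inside Pre_).
def Pre_maximum_weight_paths (n : Int) (edges : List (List Int)) (q : Int) (queries : List Int) : Prop :=
  (queries = [] ∨ (queries.length : Int) ≤ q) ∧
  ∀ e ∈ edges, 3 ≤ e.length ∧
    ((∃ v ∈ queries, PySem.List.pyGetD e 2 0 ≤ v) →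
      e.length = 3 ∧
      (-(n + 1) ≤ PySem.List.pyGetD e 0 0 ∧ PySem.List.pyGetD e 0 0 ≤ n) ∧
      (-(n + 1) ≤ PySem.List.pyGetD e 1 0 ∧ PySem.List.pyGetD e 1 0 ≤ n))
instance (n : Int) (edges : List (List Int)) (q : Int) (queries : List Int) : Decidable (Pre_maximum_weight_paths n edges q queries) := by unfold Pre_maximum_weight_paths; infer_instance

def pvWitness_maximum_weight_paths : Int × List (List Int) × Int × List Int :=
  (2, [[1, 2, 5], [0, 1, 3]], 3, [4, 5, 2])

def Spec_maximum_weight_paths (n : Int) (edges : List (List Int)) (q : Int) (queries : List Int) (out : List Int) : Prop := out = maximum_weight_paths_alt n edges q queries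
instance (n : Int) (edges : List (List Int)) (q : Int) (queries : List Int) (out : List Int) : Decidable (Spec_maximum_weight_paths n edges q queries out) := by unfold Spec_maximum_weight_paths; infer_instance

-- ===== CLAIM (what is proved, stated in full; the proofs are below) =====
def Claim_equal_maximum_weight_paths : Prop := ∀ (n : Int) (edges : List (List Int)) (q : Int) (queries : List Int), Dom_maximum_weight_paths n edges q queries → Pre_maximum_weight_paths n edges q queries → Spec_maximum_weight_paths n edges q queries (maximum_weight_paths n edges q queries)

-- ===== LEMMAS AND PROOFS =====

theorem pvAdvance_eq_takeWhile (es : List (List Int)) (val : Int) :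
    ∀ (i : Nat) (st : List Int × List Int × Int),
    pvAdvance es val st i =
      (((es.drop i).takeWhile (fun e => decide (PySem.List.pyGetD e 2 0 ≤ val))).foldl pvStep st,
       i + ((es.drop i).takeWhile (fun e => decide (PySem.List.pyGetD e 2 0 ≤ val))).length) := by
  suffices H : ∀ (d i : Nat), es.length - i ≤ d → ∀ st,
      pvAdvance es val st i =
      (((es.drop i).takeWhile (fun e => decide (PySem.List.pyGetD e 2 0 ≤ val))).foldl pvStep st,
       i + ((es.drop i).takeWhile (fun e => decide (PySem.List.pyGetD e 2 0 ≤ val))).length) by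
    intro i st; exact H (es.length - i) i le_rfl st
  intro d
  induction d with
  | zero =>
    intro i hi st
    rw [pvAdvance, dif_neg (by omega)]
    simp [List.drop_eq_nil_of_le (by omega : es.length ≤ i)]
  | succ d ih =>
    intro i hi st
    rw [pvAdvance]
    by_cases h : i < es.length ∧ PySem.List.pyGetD (PySem.List.pyGetD es (i : Int) []) 2 0 ≤ val
    · rw [dif_pos h]
      have hget : PySem.List.pyGetD es (i : Int) [] = es[i]'h.1 := by
        simp [PySem.List.pyGetD_natCast, List.getD_eq_getElem?_getD, List.getElem?_eq_getElem h.1]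
      have hdrop : es.drop i = es[i]'h.1 :: es.drop (i + 1) := List.drop_eq_getElem_cons h.1
      rw [ih (i + 1) (by omega) _, hdrop, List.takeWhile_cons_of_pos (by rw [← hget]; exact decide_eq_true h.2)]
      simp only [hget, List.foldl_cons, List.length_cons]
      refine Prod.ext rfl ?_
      simp only []
      omega
    · rw [dif_neg h]
      rcases Nat.lt_or_ge i es.length with hlt | hge
      · have hget : PySem.List.pyGetD es (i : Int) [] = es[i]'hlt := by
          simp [PySem.List.pyGetD_natCast, List.getD_eq_getElem?_getD, List.getElem?_eq_getElem hlt]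
        have hdrop : es.drop i = es[i]'hlt :: es.drop (i + 1) := List.drop_eq_getElem_cons hlt
        have hnp : ¬ PySem.List.pyGetD (es[i]'hlt) 2 0 ≤ val := by
          intro hc; exact h ⟨hlt, by rw [hget]; exact hc⟩
        rw [hdrop, List.takeWhile_cons_of_neg (by simpa using hnp)]
        simp
      · simp [List.drop_eq_nil_of_le hge]

theorem pv_filter_eq_takeWhile (es : List (List Int)) (val : Int)
    (hes : es.Pairwise (fun a b => PySem.List.pyGetD a 2 0 ≤ PySem.List.pyGetD b 2 0)) :
    es.filter (fun e => decide (PySem.List.pyGetD e 2 0 ≤ val)) =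
      es.takeWhile (fun e => decide (PySem.List.pyGetD e 2 0 ≤ val)) := by
  induction es with
  | nil => rfl
  | cons a l ih =>
    rcases List.pairwise_cons.1 hes with ⟨ha, hl⟩
    by_cases hp : PySem.List.pyGetD a 2 0 ≤ val
    · rw [List.filter_cons, List.takeWhile_cons]
      simp only [hp, decide_true, if_true, ih hl]
    · have hd : (decide (PySem.List.pyGetD a 2 0 ≤ val)) = false := decide_eq_false hp
      rw [List.filter_cons, List.takeWhile_cons, hd]
      simp only [Bool.false_eq_true, if_false]
      refine List.filter_eq_nil_iff.2 (fun b hb => ?_)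
      simp only [decide_eq_true_eq]
      exact fun hc => hp (le_trans (ha b hb) hc)

theorem pv_takeWhile_append_of_all {α : Type} (p : α → Bool) (l1 l2 : List α)
    (h : ∀ x ∈ l1, p x = true) :
    (l1 ++ l2).takeWhile p = l1 ++ l2.takeWhile p := by
  have hself : l1.takeWhile p = l1 := List.takeWhile_eq_self_iff.2 h
  rw [List.takeWhile_append, if_pos (by rw [hself])]

theorem pvLoopA (n : Int) (es : List (List Int))
    (hes : es.Pairwise (fun a b => PySem.List.pyGetD a 2 0 ≤ PySem.List.pyGetD b 2 0)) :
    ∀ (iq : List (Int × Int)) (i0 : Nat) (res : List Int),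
    iq.Pairwise (fun a b => a.2 ≤ b.2) →
    i0 ≤ es.length →
    (∀ pr ∈ iq, es.takeWhile (fun e => decide (PySem.List.pyGetD e 2 0 ≤ pr.2)) =
        es.take i0 ++ (es.drop i0).takeWhile (fun e => decide (PySem.List.pyGetD e 2 0 ≤ pr.2))) →
    (iq.foldl (pvBodyA es) ((es.take i0).foldl pvStep (pvInit n), i0, res)).2.2 =
    iq.foldl (pvBodyB n es) res := by
  intro iq
  induction iq with
  | nil => intro i0 res _ _ _; rfl
  | cons hd tl ih =>
    intro i0 res hpair hi0 hH
    rcases List.pairwise_cons.1 hpair with ⟨hhd, htl⟩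
    have hTW : es.takeWhile (fun e => decide (PySem.List.pyGetD e 2 0 ≤ hd.2)) =
        es.take i0 ++ (es.drop i0).takeWhile (fun e => decide (PySem.List.pyGetD e 2 0 ≤ hd.2)) :=
      hH hd (List.mem_cons_self)
    set w := (es.drop i0).takeWhile (fun e => decide (PySem.List.pyGetD e 2 0 ≤ hd.2)) with hw
    have hwlen : w.length ≤ es.length - i0 := by
      have := (List.takeWhile_prefix (l := es.drop i0)
        (fun e => decide (PySem.List.pyGetD e 2 0 ≤ hd.2))).length_le
      simpa [hw] using this
    have htake : es.take (i0 + w.length) = es.take i0 ++ w := by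
      rw [List.take_add]
      congr 1
      exact (List.prefix_iff_eq_take.1 (List.takeWhile_prefix _)).symm
    have hcount : ((es.take i0 ++ w).foldl pvStep (pvInit n)).2.2 = pvCount n es hd.2 := by
      unfold pvCount
      rw [PySem.List.foldl_ite_eq_foldl_filter, pv_filter_eq_takeWhile es hd.2 hes, hTW]
    have hstep : pvBodyA es ((es.take i0).foldl pvStep (pvInit n), i0, res) hd =
        ((es.take (i0 + w.length)).foldl pvStep (pvInit n), i0 + w.length,
          PySem.List.pySetD res hd.1 (pvCount n es hd.2)) := by
      unfold pvBodyA
      rw [pvAdvance_eq_takeWhile]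
      simp only [← hw, htake, List.foldl_append]
      rw [← List.foldl_append, ← htake]
      have hc2 : (List.foldl pvStep (pvInit n) (List.take (i0 + w.length) es)).2.2 =
          pvCount n es hd.2 := by rw [htake]; exact hcount
      rw [hc2]
    rw [List.foldl_cons, List.foldl_cons, hstep]
    show (tl.foldl (pvBodyA es) _).2.2 = tl.foldl (pvBodyB n es) (pvBodyB n es res hd)
    have hres : pvBodyB n es res hd = PySem.List.pySetD res hd.1 (pvCount n es hd.2) := rfl
    rw [hres]
    apply ih (i0 + w.length) _ htl (by omega)
    intro pr hpr
    have hvv : hd.2 ≤ pr.2 := hhd pr hpr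
    have hmemP : ∀ x ∈ es.take (i0 + w.length),
        (fun e => decide (PySem.List.pyGetD e 2 0 ≤ pr.2)) x = true := by
      intro x hx
      rw [htake, ← hTW] at hx
      have hx2 := List.mem_takeWhile_imp hx
      simp only [decide_eq_true_eq] at hx2 ⊢
      exact le_trans hx2 hvv
    conv_lhs => rw [← List.take_append_drop (i0 + w.length) es]
    rw [pv_takeWhile_append_of_all _ _ _ hmemP]

theorem pvPermFold (n : Int) (es : List (List Int)) (queries : List Int) (res : List Int) :
    (PySem.List.sorted (PySem.List.enumerate queries) (fun x => x.2)).foldl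
        (pvBodyB n es) res =
      (PySem.List.enumerate queries).foldl (pvBodyB n es) res := by
  apply List.Perm.foldl_eq' (PySem.List.sorted_perm _ _ _)
  intro x hx y hy b
  rw [PySem.List.mem_sorted, PySem.List.mem_enumerate_iff] at hx hy
  rcases hx with ⟨k1, hk1, rfl⟩
  rcases hy with ⟨k2, hk2, rfl⟩
  by_cases hk : k1 = k2
  · subst hk; rfl
  · simp only [pvBodyB, zero_add, PySem.List.pySetD_natCast]
    exact List.set_comm _ _ hk

-- ===== VERDICT (by name: the statement is the Claim_ definition above) =====
theorem maximum_weight_paths_spec : Claim_equal_maximum_weight_paths := by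
  intro n edges q queries _ _
  unfold Spec_maximum_weight_paths maximum_weight_paths maximum_weight_paths_alt
  rw [← pvPermFold]
  have h := pvLoopA n (PySem.List.sorted edges (fun x => PySem.List.pyGetD x 2 0))
    (PySem.List.sorted_pairwise _ _) (PySem.List.sorted (PySem.List.enumerate queries) (fun x => x.2))
    0 (PySem.List.pyRepeat [0] q) (PySem.List.sorted_pairwise _ _) (Nat.zero_le _)
    (by intro pr _; simp)
  simpa using h
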